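-- pv_equiv track=rewrite | github.com/Ectrald/AOIS | lr3/main.py | prime_implicant_chart
-- ===== SOURCE A (Python) =====
-- def prime_implicant_chart(prime_implicants, minterms):
--     """
--     Строит таблицу покрытия: для каждого минтерма возвращает список индексов
--     простых импликант, которые его покрывают.
--     """
--     chart = {}
--     for m in minterms:
--         chart[m] = []
--         for idx, (bits, mt_set) in enumerate(prime_implicants):
--             if m in mt_set:
--                 chart[m].append(idx)
--     return chart
-- ===== SOURCE B (Python) =====
-- def prime_implicant_chart(prime_implicants, minterms):
--     """
--     Строит таблицу покрытия: для каждого минтерма возвращает список индексов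
--     простых импликант, которые его покрывают.
--     """
--     # Stage 1: one pass over the implicants builds a complete inverted index
--     # minterm -> ascending implicant indices (independent of `minterms`).
--     cover = {}
--     for idx, (bits, mt_set) in enumerate(prime_implicants):
--         for m in mt_set:
--             lst = cover.setdefault(m, [])
--             if not lst or lst[-1] != idx:
--                 lst.append(idx)
--     # Stage 2: the chart is a pure projection of that index onto the minterms.
--     return {m: list(cover.get(m, [])) for m in minterms}
-- ===== Notes on version B (the rewrite author's own statement) =====
-- stated objective: faster
-- what changed: Two staged passes instead of A's nested query loops: B first builds a complete inverted index minterm->ascending implicant indices in one pass over the implicants (independent of the minterms argument, deduplicating repeats by comparing against the list's last index), then produces the chart as a pure dictionary projection of that index onto the minterms; no loop over implicants per minterm remains.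
import Mathlib
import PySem

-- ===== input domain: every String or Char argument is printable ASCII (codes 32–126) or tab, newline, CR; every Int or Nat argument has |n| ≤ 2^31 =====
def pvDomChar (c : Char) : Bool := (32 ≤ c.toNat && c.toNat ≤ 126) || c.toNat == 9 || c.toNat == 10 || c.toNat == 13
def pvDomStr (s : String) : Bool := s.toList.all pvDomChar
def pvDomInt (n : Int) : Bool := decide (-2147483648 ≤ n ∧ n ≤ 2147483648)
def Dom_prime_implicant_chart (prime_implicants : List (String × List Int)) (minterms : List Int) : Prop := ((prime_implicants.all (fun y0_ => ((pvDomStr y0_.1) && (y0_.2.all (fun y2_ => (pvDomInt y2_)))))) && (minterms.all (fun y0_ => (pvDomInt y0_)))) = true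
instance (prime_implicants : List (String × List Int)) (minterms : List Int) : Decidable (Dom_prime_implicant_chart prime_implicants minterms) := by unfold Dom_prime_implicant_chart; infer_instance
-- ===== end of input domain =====

-- B replaces A's per-minterm scan of all implicants by two staged passes: one pass over the
-- implicants builds a complete inverted index minterm -> indices, then the chart is a pure
-- projection of that index onto the minterms (objective: faster).


-- ===== PORT A =====
-- chart[m].append(idx) is ported as Dict.modify; enumerate is PySem.List.enumerate.
def prime_implicant_chart (prime_implicants : List (String × List Int)) (minterms : List Int) : List (Int × List Int) :=
  (minterms.foldl (fun chart m =>
      (PySem.List.enumerate prime_implicants).foldl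
        (fun chart p => if m ∈ p.2.2 then chart.modify m [] (· ++ [p.1]) else chart)
        (chart.insert m []))
    PySem.Dict.empty).items

-- ===== PORT B =====
-- Body of B's inner loop: lst = cover.setdefault(m, []); if not lst or lst[-1] != idx: lst.append(idx).
-- lst[-1] on the nonempty lst is List.getLast?; the in-place append is Dict.modify.
def pvBStep (idx : Int) (cover : PySem.Dict Int (List Int)) (m : Int) : PySem.Dict Int (List Int) :=
  let cover := cover.setdefault m []
  let lst := cover.getD m []
  if lst = [] ∨ lst.getLast? ≠ some idx then cover.modify m [] (· ++ [idx]) else cover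

-- Stage 1 builds the inverted index `cover`; stage 2 is the dict comprehension over minterms
-- (a fold of inserts; cover.get(m, []) is getD).
def prime_implicant_chart_alt (prime_implicants : List (String × List Int)) (minterms : List Int) : List (Int × List Int) :=
  let cover : PySem.Dict Int (List Int) :=
    (PySem.List.enumerate prime_implicants).foldl
      (fun cover p => p.2.2.foldl (pvBStep p.1) cover)
      PySem.Dict.empty
  (minterms.foldl (fun d m => d.insert m (cover.getD m [])) PySem.Dict.empty).items

-- ===== PRECONDITION & SPEC =====
def Spec_prime_implicant_chart (prime_implicants : List (String × List Int)) (minterms : List Int) (out : List (Int × List Int)) : Prop := out = prime_implicant_chart_alt prime_implicants minterms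
instance (prime_implicants : List (String × List Int)) (minterms : List Int) (out : List (Int × List Int)) : Decidable (Spec_prime_implicant_chart prime_implicants minterms out) := by unfold Spec_prime_implicant_chart; infer_instance

-- ===== CLAIM (what is proved, stated in full; the proofs are below) =====
def Claim_equal_prime_implicant_chart : Prop := ∀ (prime_implicants : List (String × List Int)) (minterms : List Int), Dom_prime_implicant_chart prime_implicants minterms → Spec_prime_implicant_chart prime_implicants minterms (prime_implicant_chart prime_implicants minterms)

-- ===== LEMMAS AND PROOFS =====

-- the list of indices of l covering m, accumulated on acc (A's inner loop on the value side)
def pvCov (l : List (Int × (String × List Int))) (m : Int) (acc : List Int) : List Int :=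
  l.foldl (fun a p => if m ∈ p.2.2 then a ++ [p.1] else a) acc

theorem pvCov_cons (p : Int × (String × List Int)) (l : List (Int × (String × List Int)))
    (m : Int) (acc : List Int) :
    pvCov (p :: l) m acc = pvCov l m (if m ∈ p.2.2 then acc ++ [p.1] else acc) := rfl

-- A's inner loop over a dict where key m was just inserted only rewrites the m-entry
theorem pvA_inner (l : List (Int × (String × List Int))) (d : PySem.Dict Int (List Int))
    (m : Int) (v : List Int) :
    l.foldl (fun chart p => if m ∈ p.2.2 then chart.modify m [] (· ++ [p.1]) else chart)
        (d.insert m v)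
      = d.insert m (pvCov l m v) := by
  induction l generalizing v with
  | nil => rfl
  | cons p l ih =>
    simp only [List.foldl_cons, pvCov_cons]
    by_cases h : m ∈ p.2.2
    · have : (d.insert m v).modify m [] (· ++ [p.1]) = d.insert m (v ++ [p.1]) := by
        show (d.insert m v).insert m ((d.insert m v).getD m [] ++ [p.1]) = _
        rw [PySem.Dict.getD_insert_self, PySem.Dict.insert_insert_self]
      simp [h, this, ih]
    · simp [h, ih]

-- pvBStep only changes lookups at key m (and the getD m [] of setdefault m [] is unchanged)
theorem pvBStep_getD (idx : Int) (cover : PySem.Dict Int (List Int)) (m k : Int) :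
    (pvBStep idx cover m).getD k []
      = if k = m ∧ ((cover.getD m [] = []) ∨ (cover.getD m []).getLast? ≠ some idx)
        then cover.getD m [] ++ [idx] else cover.getD k [] := by
  have hsd : ∀ j, (cover.setdefault m []).getD j [] = cover.getD j [] := by
    intro j
    by_cases hj : j = m
    · subst hj; exact PySem.Dict.getD_setdefault_self ..
    · simp [PySem.Dict.getD_eq_get?_getD, PySem.Dict.get?_setdefault_of_ne, hj]
  unfold pvBStep
  simp only [hsd]
  by_cases hc : cover.getD m [] = [] ∨ (cover.getD m []).getLast? ≠ some idx
  · simp only [if_pos hc, PySem.Dict.getD_modify, hsd]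
    by_cases hk : k = m <;> simp [hk, hc]
  · simp only [if_neg hc, hsd]
    by_cases hk : k = m <;> simp [hk, hc]

-- B's inner loop: each key of S gets idx appended exactly once (lists already ending in idx
-- are the ones appended earlier in this very loop; g is the pre-loop table, T the keys done)
theorem pvB_inner (idx : Int) (S : List Int) (g : Int → List Int)
    (hg : ∀ k, (g k).getLast? ≠ some idx) :
    ∀ (T : List Int) (cover : PySem.Dict Int (List Int)),
      (∀ k, cover.getD k [] = if k ∈ T then g k ++ [idx] else g k) →
      ∀ k, (S.foldl (pvBStep idx) cover).getD k []
        = if k ∈ T ∨ k ∈ S then g k ++ [idx] else g k := by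
  induction S with
  | nil => intro T cover hc k; simp [hc k]
  | cons m S ih =>
    intro T cover hc k
    simp only [List.foldl_cons]
    by_cases hm : m ∈ T
    · have hstep : ∀ j, (pvBStep idx cover m).getD j [] = cover.getD j [] := by
        intro j
        rw [pvBStep_getD]
        have : ¬ ((cover.getD m [] = []) ∨ (cover.getD m []).getLast? ≠ some idx) := by
          rw [hc m, if_pos hm]; simp
        simp [this]
      have := ih T (pvBStep idx cover m) (fun j => (hstep j).trans (hc j)) k
      rw [this]
      by_cases h1 : k ∈ T <;> by_cases h2 : k ∈ S <;> by_cases h3 : k = m <;>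
        simp [h1, h2, h3, hm]
    · have hcond : (cover.getD m [] = []) ∨ (cover.getD m []).getLast? ≠ some idx := by
        rw [hc m, if_neg hm]; exact Or.inr (hg m)
      have hstep : ∀ j, (pvBStep idx cover m).getD j []
          = if j ∈ m :: T then g j ++ [idx] else g j := by
        intro j
        rw [pvBStep_getD]
        by_cases hj : j = m
        · subst hj; simp [hc j, hm, hg j]
        · simp [hj, hc j]
      have := ih (m :: T) (pvBStep idx cover m) hstep k
      rw [this]
      by_cases h1 : k ∈ T <;> by_cases h2 : k ∈ S <;> by_cases h3 : k = m <;>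
        simp [h1, h2, h3]

-- B's outer loop computes, at every key, exactly A's cover list pvCov
theorem pvB_outer : ∀ (l : List (Int × (String × List Int)))
    (cover : PySem.Dict Int (List Int)),
    (l.map Prod.fst).Nodup →
    (∀ p ∈ l, ∀ k, ((cover.getD k []).getLast? ≠ some p.1)) →
    ∀ k, (l.foldl (fun c p => p.2.2.foldl (pvBStep p.1) c) cover).getD k []
      = pvCov l k (cover.getD k []) := by
  intro l
  induction l with
  | nil => intro cover _ _ k; rfl
  | cons p l ih =>
    intro cover hnd hlast k
    simp only [List.foldl_cons, pvCov_cons]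
    have hinner := pvB_inner p.1 p.2.2 (fun j => cover.getD j [])
      (fun j => hlast p (List.mem_cons_self ..) j) [] cover (by simp)
    have hinner' : ∀ j, (p.2.2.foldl (pvBStep p.1) cover).getD j []
        = if j ∈ p.2.2 then cover.getD j [] ++ [p.1] else cover.getD j [] := by
      intro j; rw [hinner j]; simp
    have hnd' : (l.map Prod.fst).Nodup := (List.nodup_cons.mp (by simpa using hnd)).2
    have hp1 : p.1 ∉ l.map Prod.fst := (List.nodup_cons.mp (by simpa using hnd)).1
    have hlast' : ∀ q ∈ l, ∀ j,
        (((p.2.2.foldl (pvBStep p.1) cover).getD j []).getLast? ≠ some q.1) := by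
      intro q hq j
      have hqm : q.1 ∈ l.map Prod.fst := List.mem_map_of_mem hq
      have hne : p.1 ≠ q.1 := fun h => hp1 (h ▸ hqm)
      rw [hinner' j]
      by_cases hj : j ∈ p.2.2
      · simp only [if_pos hj, List.getLast?_concat, ne_eq, Option.some.injEq]
        exact hne
      · simp only [if_neg hj]; exact hlast q (List.mem_cons_of_mem _ hq) j
    rw [ih _ hnd' hlast' k, hinner' k]

-- ===== VERDICT (by name: the statement is the Claim_ definition above) =====
theorem prime_implicant_chart_spec : Claim_equal_prime_implicant_chart := by
  intro pis ms _
  show prime_implicant_chart pis ms = prime_implicant_chart_alt pis ms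
  unfold prime_implicant_chart prime_implicant_chart_alt
  have hA : (fun (chart : PySem.Dict Int (List Int)) (m : Int) =>
      (PySem.List.enumerate pis).foldl
        (fun chart p => if m ∈ p.2.2 then chart.modify m [] (· ++ [p.1]) else chart)
        (chart.insert m []))
      = fun chart m => chart.insert m (pvCov (PySem.List.enumerate pis) m []) := by
    funext chart m
    exact pvA_inner _ chart m []
  have hnd : ((PySem.List.enumerate pis).map Prod.fst).Nodup :=
    (List.pairwise_map.mpr
      (PySem.List.pairwise_lt_enumerate pis 0)).imp (fun h => ne_of_lt h)
  have hcov : ∀ k,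
      ((PySem.List.enumerate pis).foldl (fun c p => p.2.2.foldl (pvBStep p.1) c)
        PySem.Dict.empty).getD k [] = pvCov (PySem.List.enumerate pis) k [] := by
    intro k
    have := pvB_outer (PySem.List.enumerate pis) PySem.Dict.empty hnd
      (by intro p _ j; simp [PySem.Dict.getD_empty]) k
    simpa [PySem.Dict.getD_empty] using this
  have hB : (fun (d : PySem.Dict Int (List Int)) (m : Int) =>
      d.insert m (((PySem.List.enumerate pis).foldl (fun c p => p.2.2.foldl (pvBStep p.1) c)
        PySem.Dict.empty).getD m []))
      = fun d m => d.insert m (pvCov (PySem.List.enumerate pis) m []) := by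
    funext d m; rw [hcov m]
  rw [hA]
  show _ = (ms.foldl (fun d m =>
      d.insert m (((PySem.List.enumerate pis).foldl (fun c p => p.2.2.foldl (pvBStep p.1) c)
        PySem.Dict.empty).getD m [])) PySem.Dict.empty).items
  rw [hB]
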